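-- pv_equiv track=rewrite | github.com/Hi-Im-Simon/Advent-of-Code | 2021/day-03.py | get_gamma_epsilon
-- ===== SOURCE A (Python) =====
-- def get_common_bits(f):
--     common = [0 for _ in range(len(f[0]))]
--     for i in range(len(f[0])):
--         for line in f:
--             if line[i] == '1':
--                 common[i] += 1
--     return common
--
-- def get_gamma_epsilon(f):
--     common = get_common_bits(f)
--     gamma = ''
--     for bit in common:
--         if bit > len(f) // 2:
--             gamma += '1'
--         else:
--             gamma += '0'
--     epsilon = gamma.replace('0', '2').replace('1', '0').replace('2', '1')
--     gamma, epsilon = int(gamma, 2), int(epsilon, 2)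
--     return gamma, epsilon, gamma * epsilon
-- ===== SOURCE B (Python) =====
-- def get_gamma_epsilon(f):
--     # Build gamma directly as an integer, column by column; epsilon is its
--     # complement within the bit width, so no string building/flipping/parsing.
--     width = len(f[0])
--     half = len(f) // 2
--     gamma = 0
--     for i in range(width):
--         ones = 0
--         for line in f:
--             if line[i] == '1':
--                 ones += 1
--         gamma = gamma * 2 + (1 if ones > half else 0)
--     epsilon = (1 << width) - 1 - gamma
--     return gamma, epsilon, gamma * epsilon
-- ===== Notes on version B (the rewrite author's own statement) =====
-- stated objective: idiomatic
-- what changed: B fuses the count pass and the bit pass into one loop that accumulates gamma as an integer (gamma*2 + bit) and derives epsilon as the width-masked complement (1<<width)-1-gamma, replacing A's intermediate count list, binary-string concatenation, three-step .replace flip and int(...,2) parses.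
-- crash fix: On a non-empty f whose first line is empty, A raises ValueError (int('', 2)); B returns (0, 0, 0). — e.g. on get_gamma_epsilon([""]): A raises ValueError, B returns (0, 0, 0)
import Mathlib
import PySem

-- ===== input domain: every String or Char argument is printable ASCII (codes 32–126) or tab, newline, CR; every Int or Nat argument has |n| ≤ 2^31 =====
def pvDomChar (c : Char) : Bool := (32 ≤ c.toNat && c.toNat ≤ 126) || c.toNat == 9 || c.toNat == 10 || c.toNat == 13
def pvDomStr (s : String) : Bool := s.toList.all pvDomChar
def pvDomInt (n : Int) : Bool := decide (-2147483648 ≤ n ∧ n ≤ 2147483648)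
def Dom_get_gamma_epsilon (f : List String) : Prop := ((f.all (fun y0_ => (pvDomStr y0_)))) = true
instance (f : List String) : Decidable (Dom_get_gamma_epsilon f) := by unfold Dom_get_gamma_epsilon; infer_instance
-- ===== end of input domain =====

-- B builds gamma directly as an integer (gamma*2 + bit per column) and gets epsilon as the
-- width-masked complement, replacing A's count list + binary-string build + .replace flip + int(...,2).


-- ===== PORT A =====
-- int(s, 2): hand-ported (PySem.Int.ofCharsBase?'s worker is private, no characterisation
-- lemmas are available); exact for the strings this program parses under Pre_: non-empty,
-- every char '0' or '1' (gamma/epsilon below are such). On the empty string Python raises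
-- ValueError — excluded by Pre_.
def pyIntBin (cs : List Char) : Int :=
  cs.foldl (fun a c => a * 2 + (if c = '1' then 1 else 0)) 0

-- gamma/epsilon strings are carried as List Char (PySem.Chars convention); += is ++.
def get_common_bits (f : List String) : List Int :=
  -- f[0]: IndexError on f = [] is excluded by Pre_ (headD junk outside it)
  let w := (f.headD "").length
  let common := List.replicate w (0 : Int)
  (List.range w).foldl (fun common (i : Nat) =>
    f.foldl (fun common line =>
      -- line[i]: IndexError (pyGet? = none) excluded by Pre_; none ≠ some '1' falls to else
      if PySem.Str.pyGet? line (i : Int) = some '1' then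
        common.set i (common.getD i 0 + 1)
      else common) common) common

def get_gamma_epsilon (f : List String) : Int × Int × Int :=
  let common := get_common_bits f
  let gamma := common.foldl (fun g bit =>
    g ++ (if bit > PySem.Int.floordiv (f.length : Int) 2 then ['1'] else ['0'])) ([] : List Char)
  let epsilon := PySem.Chars.replace (PySem.Chars.replace (PySem.Chars.replace gamma ['0'] ['2']) ['1'] ['0']) ['2'] ['1']
  let g := pyIntBin gamma
  let e := pyIntBin epsilon
  (g, e, g * e)

-- ===== PORT B =====
def get_gamma_epsilon_alt (f : List String) : Int × Int × Int :=
  let width := (f.headD "").length      -- len(f[0]); IndexError on f = [] excluded by Pre_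
  let half := PySem.Int.floordiv (f.length : Int) 2
  let gamma := (List.range width).foldl (fun g (i : Nat) =>
    let ones := f.foldl (fun c line =>
      if PySem.Str.pyGet? line (i : Int) = some '1' then c + 1 else c) (0 : Int)
    g * 2 + (if ones > half then 1 else 0)) 0
  let epsilon := ((1 : Int) <<< width) - 1 - gamma
  (gamma, epsilon, gamma * epsilon)

-- ===== PRECONDITION & SPEC =====
-- Pre_ = exactly the inputs where Python A returns: f non-empty (else f[0] IndexError),
-- f[0] non-empty (else int('', 2) ValueError), every line at least as long as f[0]
-- (else line[i] IndexError).
def Pre_get_gamma_epsilon (f : List String) : Prop :=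
  f ≠ [] ∧ 0 < (f.headD "").length ∧ ∀ s ∈ f, (f.headD "").length ≤ s.length
instance (f : List String) : Decidable (Pre_get_gamma_epsilon f) := by
  unfold Pre_get_gamma_epsilon; infer_instance

def pvWitness_get_gamma_epsilon : List String := ["10", "01", "11"]

-- On a non-empty f whose first line is empty, A raises ValueError (int('', 2)); B returns (0, 0, 0).
def Raises_get_gamma_epsilon (f : List String) : Prop :=
  f ≠ [] ∧ (f.headD "").length = 0
instance (f : List String) : Decidable (Raises_get_gamma_epsilon f) := by
  unfold Raises_get_gamma_epsilon; infer_instance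
def pvRaiseWitness_get_gamma_epsilon : List String := [""]
def pvRaiseWitnessOut_get_gamma_epsilon : Int × Int × Int := (0, 0, 0)

def Spec_get_gamma_epsilon (f : List String) (out : Int × Int × Int) : Prop :=
  out = get_gamma_epsilon_alt f
instance (f : List String) (out : Int × Int × Int) : Decidable (Spec_get_gamma_epsilon f out) := by
  unfold Spec_get_gamma_epsilon; infer_instance

-- ===== CLAIM (what is proved, stated in full; the proofs are below) =====
def Claim_equal_get_gamma_epsilon : Prop := ∀ (f : List String), Dom_get_gamma_epsilon f → Pre_get_gamma_epsilon f → Spec_get_gamma_epsilon f (get_gamma_epsilon f)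
def Claim_raises_get_gamma_epsilon : Prop := (∀ (f : List String), Dom_get_gamma_epsilon f → Raises_get_gamma_epsilon f → ¬ Pre_get_gamma_epsilon f) ∧ (Dom_get_gamma_epsilon (pvRaiseWitness_get_gamma_epsilon) ∧ Raises_get_gamma_epsilon (pvRaiseWitness_get_gamma_epsilon) ∧ get_gamma_epsilon_alt (pvRaiseWitness_get_gamma_epsilon) = pvRaiseWitnessOut_get_gamma_epsilon)

-- ===== LEMMAS AND PROOFS =====

-- the per-column 1-count, as B computes it
def pvCnt (f : List String) (i : Nat) : Int :=
  f.foldl (fun c line => if PySem.Str.pyGet? line (i : Int) = some '1' then c + 1 else c) 0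

theorem pvCnt_foldl (i : Nat) (f : List String) (a : Int) :
    f.foldl (fun c line => if PySem.Str.pyGet? line (i : Int) = some '1' then c + 1 else c) a
      = a + pvCnt f i := by
  induction f generalizing a with
  | nil => simp [pvCnt]
  | cons hd tl ih =>
      simp only [pvCnt, List.foldl_cons] at ih ⊢
      rw [ih, ih (if PySem.Str.pyGet? hd (i : Int) = some '1' then ((0 : Int) + 1) else 0)]
      split_ifs <;> ring

theorem pv_set_getD_self (l : List Int) (i : Nat) : l.set i (l.getD i 0) = l := by
  by_cases h : i < l.length
  · rw [List.getD_eq_getElem?_getD, List.getElem?_eq_getElem h]; simp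
  · exact List.set_eq_of_length_le (by omega)

-- A's inner loop over f increments slot i by the count
theorem pvInner (i : Nat) (f : List String) (cm : List Int) :
    f.foldl (fun cm line =>
        if PySem.Str.pyGet? line (i : Int) = some '1' then
          cm.set i (cm.getD i 0 + 1)
        else cm) cm
      = cm.set i (cm.getD i 0 + pvCnt f i) := by
  induction f generalizing cm with
  | nil =>
      rw [List.foldl_nil, show pvCnt [] i = 0 from rfl, add_zero, pv_set_getD_self]
  | cons hd tl ih =>
      have hcnt : pvCnt (hd :: tl) i
          = (if PySem.Str.pyGet? hd (i : Int) = some '1' then (1 : Int) else 0) + pvCnt tl i := by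
        conv_lhs => rw [pvCnt]
        simp only [List.foldl_cons]
        rw [pvCnt_foldl]
        split_ifs <;> ring
      simp only [List.foldl_cons]
      by_cases h : PySem.Str.pyGet? hd (i : Int) = some '1'
      · rw [if_pos h, ih]
        by_cases hi : i < cm.length
        · rw [List.set_set, List.getD_eq_getElem?_getD (l := cm.set i _),
            List.getElem?_set_self (by simpa using hi)]
          rw [hcnt, if_pos h]
          simp only [Option.getD_some]
          congr 1
          ring
        · rw [List.set_eq_of_length_le (l := cm) (by omega),
            List.set_eq_of_length_le (l := cm) (by omega),
            List.set_eq_of_length_le (l := cm) (by omega)]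
      · rw [if_neg h, ih, hcnt, if_neg h]
        congr 1
        ring

-- A's outer loop produces the per-column counts
theorem pvCommon (f : List String) :
    get_common_bits f
      = (List.range (f.headD "").length).map (fun i => pvCnt f i) := by
  unfold get_common_bits
  generalize (f.headD "").length = w
  suffices h : ∀ n ≤ w,
      (List.range n).foldl (fun common (i : Nat) =>
        f.foldl (fun common line =>
          if PySem.Str.pyGet? line (i : Int) = some '1' then
            common.set i (common.getD i 0 + 1)
          else common) common) (List.replicate w (0 : Int))
        = (List.range n).map (fun i => pvCnt f i) ++ List.replicate (w - n) (0 : Int) by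
    have := h w le_rfl
    simpa using this
  intro n hn
  induction n with
  | zero => simp
  | succ n ih =>
      rw [List.range_succ, List.foldl_append, ih (by omega)]
      simp only [List.foldl_cons, List.foldl_nil]
      rw [pvInner]
      have hrep : List.replicate (w - n) (0 : Int) = 0 :: List.replicate (w - n - 1) 0 := by
        rw [← List.replicate_succ]; congr 1; omega
      have heq : w - n - 1 = w - (n + 1) := by omega
      have h0 : (List.map (fun i => pvCnt f i) (List.range n)
          ++ List.replicate (w - n) (0 : Int)).getD n 0 = 0 := by
        rw [List.getD_append_right _ _ _ _ (by simp), hrep]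
        simp
      rw [List.set_append, if_neg (by simp), h0]
      simp only [List.length_map, List.length_range, Nat.sub_self]
      rw [hrep, heq]
      simp

-- complementary binary folds sum to 2^len - 1
theorem pvComplFold {α : Type} (v : α → Int) (l : List α) (g e : Int) :
    l.foldl (fun a x => a * 2 + v x) g + l.foldl (fun a x => a * 2 + (1 - v x)) e
      = (g + e + 1) * 2 ^ l.length - 1 := by
  induction l generalizing g e with
  | nil => simp
  | cons hd tl ih =>
      simp only [List.foldl_cons, List.length_cons]
      rw [ih]
      ring

-- single-char Python str.replace is a map
theorem pvReplaceGo (o n : Char) (fuel : Nat) (l acc : List Char) (h : l.length ≤ fuel) :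
    PySem.Chars.replace.go [o] [n] fuel l acc
      = acc.reverse ++ l.map (fun c => if c = o then n else c) := by
  induction fuel generalizing l acc with
  | zero =>
      have : l = [] := List.eq_nil_of_length_eq_zero (by omega)
      subst this; simp [PySem.Chars.replace.go]
  | succ fuel ih =>
      cases l with
      | nil => simp [PySem.Chars.replace.go]
      | cons c t =>
          simp only [PySem.Chars.replace.go]
          by_cases hc : c = o
          · subst hc
            rw [if_pos (by simp [List.isPrefixOf])]
            simp only [List.length_cons] at h
            simp only [List.length_cons, List.length_nil, Nat.zero_add, List.drop_one,
              List.tail_cons, List.reverse_singleton]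
            rw [ih t ([n] ++ acc) (by omega)]
            simp
          · rw [if_neg (by simp [List.isPrefixOf]; exact fun h => hc h.symm)]
            simp only [List.length_cons] at h
            rw [ih t (c :: acc) (by omega)]
            simp [hc]

theorem pvReplaceSingle (s : List Char) (o n : Char) :
    PySem.Chars.replace s [o] [n] = s.map (fun c => if c = o then n else c) := by
  rw [PySem.Chars.replace]
  simp only [List.isEmpty_cons, Bool.false_eq_true, if_false]
  exact pvReplaceGo o n s.length s [] le_rfl

theorem get_gamma_epsilon_spec_aux (f : List String) :
    get_gamma_epsilon f = get_gamma_epsilon_alt f := by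
  unfold get_gamma_epsilon get_gamma_epsilon_alt
  rw [pvCommon]
  dsimp only
  generalize (f.headD "").length = w
  set half := PySem.Int.floordiv (f.length : Int) 2 with hhalf
  set v : Nat → Int := fun j => if pvCnt f j > half then 1 else 0 with hv
  have hpv : ∀ i : Nat,
      List.foldl (fun c line => if PySem.Str.pyGet? line (i : Int) = some '1' then c + 1 else c)
        (0 : Int) f = pvCnt f i := fun i => rfl
  simp only [hpv]
  -- A's gamma string is the list of per-column bit chars
  have hgamma : List.foldl (fun g bit => g ++ if bit > half then ['1'] else ['0']) []
        ((List.range w).map fun i => pvCnt f i)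
      = (List.range w).map (fun i => if pvCnt f i > half then '1' else '0') := by
    rw [PySem.List.foldl_append_eq_flatMap, List.flatMap_map, List.nil_append]
    have h1 : (fun i => if pvCnt f i > half then ['1'] else ['0'])
        = fun i => [if pvCnt f i > half then '1' else '0'] := by
      funext i; split_ifs <;> rfl
    rw [h1]
    induction List.range w with
    | nil => rfl
    | cons a l ih => simp only [List.flatMap_cons, List.map_cons, ih, List.singleton_append]
  -- the replace chain flips each bit char
  have hflip : PySem.Chars.replace (PySem.Chars.replace (PySem.Chars.replace
        ((List.range w).map (fun i => if pvCnt f i > half then '1' else '0')) ['0'] ['2'])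
        ['1'] ['0']) ['2'] ['1']
      = (List.range w).map (fun i => if pvCnt f i > half then '0' else '1') := by
    rw [pvReplaceSingle, pvReplaceSingle, pvReplaceSingle]
    simp only [List.map_map]
    apply List.map_congr_left
    intro i _
    simp only [Function.comp]
    by_cases h : pvCnt f i > half <;> simp [h]
  -- A's parsed gamma = B's integer gamma
  have hG : pyIntBin ((List.range w).map (fun i => if pvCnt f i > half then '1' else '0'))
      = (List.range w).foldl (fun g i => g * 2 + if pvCnt f i > half then 1 else 0) 0 := by
    unfold pyIntBin
    rw [List.foldl_map]
    apply PySem.List.foldl_congr_mem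
    intro acc x _
    by_cases h : pvCnt f x > half <;> simp [h]
  -- A's parsed epsilon is the masked complement of gamma
  have hE : pyIntBin ((List.range w).map (fun i => if pvCnt f i > half then '0' else '1'))
      = 2 ^ w - 1
        - pyIntBin ((List.range w).map (fun i => if pvCnt f i > half then '1' else '0')) := by
    unfold pyIntBin
    rw [List.foldl_map, List.foldl_map]
    have h1 : (List.range w).foldl (fun a i =>
          a * 2 + if (if pvCnt f i > half then '1' else '0') = '1' then 1 else 0) 0
        = (List.range w).foldl (fun a i => a * 2 + v i) 0 := by
      apply PySem.List.foldl_congr_mem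
      intro acc x _
      simp only [hv]
      by_cases h : pvCnt f x > half <;> simp [h]
    have h2 : (List.range w).foldl (fun a i =>
          a * 2 + if (if pvCnt f i > half then '0' else '1') = '1' then 1 else 0) 0
        = (List.range w).foldl (fun a i => a * 2 + (1 - v i)) 0 := by
      apply PySem.List.foldl_congr_mem
      intro acc x _
      simp only [hv]
      by_cases h : pvCnt f x > half <;> simp [h]
    have h3 := pvComplFold v (List.range w) 0 0
    simp only [List.length_range] at h3
    rw [h1, h2]
    omega
  rw [hgamma, hflip, hG, hE]
  have hshift : ((1 : Int) <<< w) = 2 ^ w := by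
    simp [Int.shiftLeft_eq]
  rw [hshift, hG]

-- ===== VERDICT (by name: the statement is the Claim_ definition above) =====
theorem get_gamma_epsilon_spec : Claim_equal_get_gamma_epsilon := by
  intro f _ _
  exact get_gamma_epsilon_spec_aux f

theorem get_gamma_epsilon_raises : Claim_raises_get_gamma_epsilon := by
  unfold Claim_raises_get_gamma_epsilon
  refine ⟨?_, by decide, by decide, by decide⟩
  rintro f _ ⟨-, hr0⟩ ⟨-, hp0, -⟩
  omega

-- self-check: the recorded raise witness satisfies Raises_ and B's port returns the stated value there
theorem pvRaises_ok : Dom_get_gamma_epsilon pvRaiseWitness_get_gamma_epsilon ∧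
    Raises_get_gamma_epsilon pvRaiseWitness_get_gamma_epsilon ∧
    get_gamma_epsilon_alt pvRaiseWitness_get_gamma_epsilon = pvRaiseWitnessOut_get_gamma_epsilon :=
  get_gamma_epsilon_raises.2
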